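-- pv_equiv track=rewrite | github.com/z1chh/Challenges | src/Kattis/Programming Challenges/Contests/C4/E.py | proc
-- ===== SOURCE A (Python) =====
-- def turn(i, s):
--     if s == "Left":
--         i -= 1
--     elif s == "Right":
--         i += 1
--     if i < 0:
--         i += 4
--     if i > 3:
--         i -= 4
--     return i
--
-- def proc(x, y, ins):
--     cx, cy = 0, 0
--     d = 0
--     for i in ins:
--         if i == "Forward":
--             if d == 0:
--                 cy += 1
--             elif d == 1:
--                 cx += 1
--             elif d == 2:
--                 cy -= 1
--             else:
--                 cx -= 1
--         else:
--             d = turn(d, i)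
--     if cx == x and cy == y:
--         return True
--     return False
-- ===== SOURCE B (Python) =====
-- def proc(x, y, ins):
--     # Back-to-front fold: no direction state at all. We maintain the
--     # displacement produced by the suffix already processed, expressed in the
--     # frame of the robot at the start of that suffix; a turn instruction
--     # rotates that displacement point, Forward shifts it one step forward.
--     px, py = 0, 0
--     for i in reversed(ins):
--         if i == "Forward":
--             py += 1
--         elif i == "Right":
--             px, py = py, -px
--         elif i == "Left":
--             px, py = -py, px
--     return (px, py) == (x, y)
-- ===== Notes on version B (the rewrite author's own statement) =====
-- stated objective: alternative
-- what changed: Instead of simulating the walk front-to-back with a mutable direction (index or vector), B folds the instruction list back-to-front with no direction state: it keeps the displacement of the already-processed suffix as a point; a turn instruction rotates that point by 90 degrees, Forward shifts it one step, so the final point is the whole walk's displacement (also a constant-factor speedup: one cheap branch per turn instead of the 4-way direction dispatch and modular turn helper).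
import Mathlib
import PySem

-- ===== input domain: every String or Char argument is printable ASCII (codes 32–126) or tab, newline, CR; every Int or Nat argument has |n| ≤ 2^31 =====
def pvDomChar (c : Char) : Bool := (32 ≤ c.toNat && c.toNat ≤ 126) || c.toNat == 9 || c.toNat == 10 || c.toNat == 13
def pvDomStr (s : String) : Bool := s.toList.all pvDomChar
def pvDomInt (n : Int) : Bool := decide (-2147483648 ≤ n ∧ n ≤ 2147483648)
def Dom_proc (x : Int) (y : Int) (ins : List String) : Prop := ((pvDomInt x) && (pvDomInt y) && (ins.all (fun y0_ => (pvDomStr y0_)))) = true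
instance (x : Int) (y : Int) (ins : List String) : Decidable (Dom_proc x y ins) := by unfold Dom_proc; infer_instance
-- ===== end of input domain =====

-- B replaces A's stateful front-to-back simulation (position + direction index + modular
-- turn helper) by a stateless back-to-front fold that rotates the suffix displacement point.

-- ===== PORT A =====
def turnA (i : Int) (s : String) : Int :=
  let i := if s == "Left" then i - 1 else if s == "Right" then i + 1 else i
  let i := if i < 0 then i + 4 else i
  if i > 3 then i - 4 else i

def procLoopA : List String → Int → Int → Int → Int × Int
  | [], cx, cy, _ => (cx, cy)
  | i :: rest, cx, cy, d =>
    if i == "Forward" then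
      if d == 0 then procLoopA rest cx (cy + 1) d
      else if d == 1 then procLoopA rest (cx + 1) cy d
      else if d == 2 then procLoopA rest cx (cy - 1) d
      else procLoopA rest (cx - 1) cy d
    else procLoopA rest cx cy (turnA d i)

def proc (x : Int) (y : Int) (ins : List String) : Bool :=
  let p := procLoopA ins 0 0 0
  if p.1 == x && p.2 == y then true else false

-- ===== PORT B =====
def stepB (p : Int × Int) (i : String) : Int × Int :=
  if i == "Forward" then (p.1, p.2 + 1)
  else if i == "Right" then (p.2, -p.1)
  else if i == "Left" then (-p.2, p.1)
  else p

def proc_alt (x : Int) (y : Int) (ins : List String) : Bool :=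
  let p := ins.reverse.foldl stepB (0, 0)
  p.1 == x && p.2 == y

-- ===== PRECONDITION & SPEC =====
def Spec_proc (x : Int) (y : Int) (ins : List String) (out : Bool) : Prop := out = proc_alt x y ins
instance (x : Int) (y : Int) (ins : List String) (out : Bool) : Decidable (Spec_proc x y ins out) := by unfold Spec_proc; infer_instance

-- ===== CLAIM (what is proved, stated in full; the proofs are below) =====
def Claim_equal_proc : Prop := ∀ (x : Int) (y : Int) (ins : List String), Dom_proc x y ins → Spec_proc x y ins (proc x y ins)

-- ===== LEMMAS AND PROOFS =====

-- the suffix displacement B computes, as a right fold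
def walkB (ins : List String) : Int × Int := List.foldr (fun i p => stepB p i) (0, 0) ins

-- rotate a point into the frame of direction index d
def rot (d : Int) (p : Int × Int) : Int × Int :=
  if d == 0 then p
  else if d == 1 then (p.2, -p.1)
  else if d == 2 then (-p.1, -p.2)
  else (-p.2, p.1)

theorem walkB_cons (i : String) (rest : List String) :
    walkB (i :: rest) = stepB (walkB rest) i := rfl

theorem loopA_walkB (ins : List String) :
    ∀ (cx cy d : Int), 0 ≤ d → d ≤ 3 →
      procLoopA ins cx cy d = (cx + (rot d (walkB ins)).1, cy + (rot d (walkB ins)).2) := by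
  induction ins with
  | nil => intro cx cy d _ _; simp only [procLoopA, walkB, List.foldr, rot]; split_ifs <;> simp
  | cons i rest ih =>
    intro cx cy d h0 h3
    rw [walkB_cons]
    by_cases hf : i = "Forward"
    · subst hf
      have hs : stepB (walkB rest) "Forward" = ((walkB rest).1, (walkB rest).2 + 1) := by
        simp [stepB]
      rw [hs]
      interval_cases d
      · simp [procLoopA, rot, ih cx (cy + 1) 0 (by norm_num) (by norm_num)]; try omega
      · simp [procLoopA, rot, ih (cx + 1) cy 1 (by norm_num) (by norm_num)]; try omega
      · simp [procLoopA, rot, ih cx (cy - 1) 2 (by norm_num) (by norm_num)]; try omega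
      · simp [procLoopA, rot, ih (cx - 1) cy 3 (by norm_num) (by norm_num)]; try omega
    · by_cases hr : i = "Right"
      · subst hr
        have hs : stepB (walkB rest) "Right" = ((walkB rest).2, -(walkB rest).1) := by
          simp [stepB]
        rw [hs]
        interval_cases d
        · simp [procLoopA, turnA, rot, ih cx cy 1 (by norm_num) (by norm_num)]; try omega
        · simp [procLoopA, turnA, rot, ih cx cy 2 (by norm_num) (by norm_num)]; try omega
        · simp [procLoopA, turnA, rot, ih cx cy 3 (by norm_num) (by norm_num)]; try omega
        · simp [procLoopA, turnA, rot, ih cx cy 0 (by norm_num) (by norm_num)]; try omega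
      · by_cases hl : i = "Left"
        · subst hl
          have hs : stepB (walkB rest) "Left" = (-(walkB rest).2, (walkB rest).1) := by
            simp [stepB]
          rw [hs]
          interval_cases d
          · simp [procLoopA, turnA, rot, ih cx cy 3 (by norm_num) (by norm_num)]; try omega
          · simp [procLoopA, turnA, rot, ih cx cy 0 (by norm_num) (by norm_num)]; try omega
          · simp [procLoopA, turnA, rot, ih cx cy 1 (by norm_num) (by norm_num)]; try omega
          · simp [procLoopA, turnA, rot, ih cx cy 2 (by norm_num) (by norm_num)]; try omega
        · have hf2 : (i == "Forward") = false := by simp [hf]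
          have hr2 : (i == "Right") = false := by simp [hr]
          have hl2 : (i == "Left") = false := by simp [hl]
          have ht : turnA d i = d := by simp [turnA, hr2, hl2]; omega
          have hs : stepB (walkB rest) i = walkB rest := by simp [stepB, hf, hr, hl]
          rw [hs]
          simp only [procLoopA, hf2, ht]
          exact ih _ _ _ h0 h3

-- ===== VERDICT (by name: the statement is the Claim_ definition above) =====
theorem proc_spec : Claim_equal_proc := by
  intro x y ins _
  unfold Spec_proc proc proc_alt
  rw [List.foldl_reverse]
  rw [show (List.foldr (fun i p => stepB p i) (0, 0) ins) = walkB ins from rfl]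
  rw [loopA_walkB ins 0 0 0 (by norm_num) (by norm_num)]
  rw [Bool.eq_iff_iff]
  simp [rot]
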